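-- pv_equiv track=rewrite | github.com/ThibTrip/npdoc_to_md | npdoc_to_md/sections.py | _find_from_lines
-- ===== SOURCE A (Python) =====
-- from typing import Any, ClassVar, Dict, List, Tuple, Union
--
-- def _find_from_lines(line:str, next_line:Union[str, None]) -> Union[str, None]:
--     """
--     Finds a section in numpydoc style docstring using a given line and the next one
--     (or None if it is the last line in the docstring).
--
--     If the line does not seem to correspond to a section, we return None.
--
--     Examples
--     --------
--     >>> l1 = 'My Section'
--     >>> l2 = '----------'
--     >>> SectionsFinder._find_from_lines(line=l1, next_line=l2)
--     'My Section'
--     """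
--     # skip empty lines
--     if next_line is None:  # last line -> cannot be a section
--         return None
--     if not len(line.strip()) or not len(next_line.strip()):
--         return None
--
--     # do an rstrip, we still need leading spaces on the left
--     # to handle cases where the section separator is misaligned
--     line, next_line = line.rstrip(), next_line.rstrip()
--
--     # check if first letter is uppercase (otherwise we consider that's not a section)
--     if not line.strip()[0].isupper():
--         return None
--
--     # if the length is not the same, then there is necessarily a misalignement
--     # because we did a rstrip before
--     # (and thus no section would be detected by numpydoc and we imitate this behavior)
--     if len(line) != len(next_line):
--         return None
--     nb_chars = len(line)
--
--     # go through previous and current line characters to determine if it's a section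
--     # note that we do need this complex code because like numpydoc we should
--     # be able to parse sections that have leading spaces even after using cleandoc()
--     # on the docstring
--     header_reached = False
--     section_name_chars = []
--     for ix, (pc, c) in enumerate(zip(line.rstrip(), next_line.rstrip())):
--         # check if we reached the header
--         if not header_reached:
--             header_reached = pc != ' '
--
--         # until we reach the header we expect to have spaces on both lines
--         if not header_reached:
--             if not (pc == c == ' '):
--                 return None
--         else:
--             section_name_chars.append(pc)
--             if c not in ('-', '='):
--                 return None
--
--         # if the for loop went through all characters without breaking
--         # it means we found a section
--         if ix == (nb_chars - 1):
--             return ''.join(section_name_chars)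
-- ===== SOURCE B (Python) =====
-- def _find_from_lines(line, next_line):
--     if next_line is None:
--         return None
--     if not line.strip() or not next_line.strip():
--         return None
--     line, next_line = line.rstrip(), next_line.rstrip()
--     if not line.strip()[0].isupper():
--         return None
--     if len(line) != len(next_line):
--         return None
--     # indent = number of leading spaces of the (rstripped) title line
--     i = len(line) - len(line.lstrip(' '))
--     # the underline must be spaces under the indent and only '-'/'=' under the title
--     if set(next_line[:i]) <= {' '} and set(next_line[i:]) <= {'-', '='}:
--         return line[i:]
--     return None
-- ===== Notes on version B (the rewrite author's own statement) =====
-- stated objective: simpler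
-- what changed: A's indexed char-by-char state machine (header_reached flag, appended name chars, early returns mid-loop) is replaced by computing the indent i = len(line) - len(line.lstrip(' ')) once and validating the underline with two slice membership checks, returning line[i:] directly.
import Mathlib
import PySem

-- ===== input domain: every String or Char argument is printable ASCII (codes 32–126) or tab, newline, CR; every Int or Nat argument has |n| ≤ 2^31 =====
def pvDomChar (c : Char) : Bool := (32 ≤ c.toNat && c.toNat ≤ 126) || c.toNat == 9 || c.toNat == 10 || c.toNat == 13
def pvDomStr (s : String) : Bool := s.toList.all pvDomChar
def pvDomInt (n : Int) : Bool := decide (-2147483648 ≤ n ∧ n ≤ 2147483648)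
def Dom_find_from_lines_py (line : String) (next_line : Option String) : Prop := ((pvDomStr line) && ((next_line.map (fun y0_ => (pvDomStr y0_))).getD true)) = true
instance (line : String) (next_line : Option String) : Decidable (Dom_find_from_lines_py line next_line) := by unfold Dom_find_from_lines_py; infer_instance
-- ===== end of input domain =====

-- B replaces A's indexed two-phase state-machine scan by computing the indent once
-- and validating the underline with two slice checks (objective: simpler).


-- ===== PORT A =====
-- the 'for ix, (pc, c) in enumerate(zip(...))' loop of A, step for step
-- (state: index ix, nb_chars, header_reached, section_name_chars)
def pvALoop : List (Char × Char) → Int → Int → Bool → List Char → Option String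
  | [], _, _, _, _ => none            -- loop ends without return -> Python returns None
  | (pc, c) :: rest, ix, nb, hr, acc =>
    let hr' := hr || pc != ' '   -- 'if not header_reached: header_reached = pc != " "'
    if !hr' then
      if !(pc == ' ' && c == ' ') then none
      else if ix == nb - 1 then some (String.ofList acc)
      else pvALoop rest (ix + 1) nb hr' acc
    else
      let acc' := acc ++ [pc]         -- section_name_chars.append(pc)
      if !(c == '-' || c == '=') then none
      else if ix == nb - 1 then some (String.ofList acc')   -- ''.join(section_name_chars)
      else pvALoop rest (ix + 1) nb hr' acc'

def find_from_lines_py (line : String) (next_line : Option String) : Option String :=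
  match next_line with
  | none => none
  | some nls =>
    let lc := line.toList
    let nc := nls.toList
    if (PySem.Chars.strip lc).isEmpty || (PySem.Chars.strip nc).isEmpty then none
    else
      let l := PySem.Chars.rstrip lc          -- line = line.rstrip()
      let n := PySem.Chars.rstrip nc          -- next_line = next_line.rstrip()
      match PySem.List.pyGet? (PySem.Chars.strip l) 0 with   -- line.strip()[0] (strip is nonempty here, so never none)
      | none => none
      | some c0 =>
        if !(PySem.Chars.isupper c0) then none
        else if l.length ≠ n.length then none
        else
          -- for loop over zip(line.rstrip(), next_line.rstrip()) with nb_chars = len(line)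
          pvALoop ((PySem.Chars.rstrip l).zip (PySem.Chars.rstrip n)) 0 (l.length : Int) false []

-- ===== PORT B =====
def find_from_lines_py_alt (line : String) (next_line : Option String) : Option String :=
  match next_line with
  | none => none
  | some nls =>
    let lc := line.toList
    let nc := nls.toList
    if (PySem.Chars.strip lc).isEmpty || (PySem.Chars.strip nc).isEmpty then none
    else
      let l := PySem.Chars.rstrip lc
      let n := PySem.Chars.rstrip nc
      match PySem.List.pyGet? (PySem.Chars.strip l) 0 with
      | none => none
      | some c0 =>
        if !(PySem.Chars.isupper c0) then none
        else if l.length ≠ n.length then none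
        else
          -- i = len(line) - len(line.lstrip(' ')): lstrip(' ') is exactly dropWhile (== ' ')
          let i := l.length - (l.dropWhile (· == ' ')).length
          -- set(next_line[:i]) <= {' '} and set(next_line[i:]) <= {'-','='}: the nonnegative in-range
          -- slices are take/drop, and a set-subset test means 'every character of the slice is in the set'
          if (n.take i).all (· == ' ') && (n.drop i).all (fun c => c == '-' || c == '=') then
            some (String.ofList (l.drop i))   -- line[i:]
          else none

-- ===== PRECONDITION & SPEC =====
def Spec_find_from_lines_py (line : String) (next_line : Option String) (out : Option String) : Prop := out = find_from_lines_py_alt line next_line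
instance (line : String) (next_line : Option String) (out : Option String) : Decidable (Spec_find_from_lines_py line next_line out) := by unfold Spec_find_from_lines_py; infer_instance

-- ===== CLAIM (what is proved, stated in full; the proofs are below) =====
def Claim_equal_find_from_lines_py : Prop := ∀ (line : String) (next_line : Option String), Dom_find_from_lines_py line next_line → Spec_find_from_lines_py line next_line (find_from_lines_py line next_line)

-- ===== LEMMAS AND PROOFS =====

lemma pv_dropWhile_idem (p : Char → Bool) (l : List Char) :
    List.dropWhile p (List.dropWhile p l) = List.dropWhile p l := by
  induction l with
  | nil => simp
  | cons a t ih => by_cases h : p a <;> simp [List.dropWhile_cons, h, ih]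

-- rstrip is idempotent
lemma pv_rstrip_idem (s : List Char) :
    PySem.Chars.rstrip (PySem.Chars.rstrip s) = PySem.Chars.rstrip s := by
  simp [PySem.Chars.rstrip, pv_dropWhile_idem]

-- a nonempty strip forces a nonempty rstrip
lemma pv_rstrip_ne_nil (s : List Char) (h : PySem.Chars.strip s ≠ []) :
    PySem.Chars.rstrip s ≠ [] := by
  intro hr
  apply h
  have hrev : List.dropWhile PySem.Chars.isspace s.reverse = [] := by
    simpa [PySem.Chars.rstrip, List.reverse_eq_nil_iff] using hr
  have hall : ∀ x ∈ s, PySem.Chars.isspace x := by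
    have h := List.dropWhile_eq_nil_iff.mp hrev
    intro x hx
    exact h x (by simpa using hx)
  have h2 : PySem.Chars.lstrip s = [] := List.dropWhile_eq_nil_iff.mpr hall
  simp [PySem.Chars.strip, h2, PySem.Chars.rstrip]

-- phase 2 of A's scan (header reached): every remaining underline char must be '-' or '='
lemma pvALoop_header (l : List Char) : ∀ (n : List Char) (ix nb : Int) (acc : List Char),
    nb = ix + l.length → l.length = n.length →
    pvALoop (l.zip n) ix nb true acc =
      if n.all (fun c => c == '-' || c == '=') then
        (if l.isEmpty then none else some (String.ofList (acc ++ l)))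
      else none := by
  induction l with
  | nil =>
    intro n ix nb acc h1 h2
    have hn : n = [] := List.eq_nil_of_length_eq_zero h2.symm
    subst hn; simp [pvALoop]
  | cons pc rest ih =>
    intro n ix nb acc h1 h2
    cases n with
    | nil => simp at h2
    | cons c nrest =>
      simp only [List.length_cons, List.length_nil] at h1 h2
      by_cases hc : (c == '-' || c == '=') = true
      · cases rest with
        | nil =>
          have hn : nrest = [] := by
            cases nrest with | nil => rfl | cons _ _ => simp at h2
          subst hn
          have hix : (ix == nb - 1) = true := by
            simp only [beq_iff_eq]; simp only [List.length_nil] at h1; omega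
          simp [pvALoop, hix, hc]
        | cons q qs =>
          have hix : (ix == nb - 1) = false := by
            simp only [beq_eq_false_iff_ne, ne_eq]
            simp only [List.length_cons] at h1; omega
          have hrec := ih nrest (ix + 1) nb (acc ++ [pc])
            (by simp only [List.length_cons] at h1 ⊢; omega)
            (by cases nrest with | nil => simp at h2 | cons _ _ => simpa using h2)
          simp [pvALoop, hix, hc, hrec, List.all_cons, List.append_assoc]
      · simp [pvALoop, hc, List.all_cons]

-- phase 1 of A's scan = B's indent-and-slices check
lemma pvALoop_pre (l : List Char) : ∀ (n : List Char) (ix nb : Int) (acc : List Char),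
    nb = ix + l.length → l.length = n.length → l ≠ [] →
    pvALoop (l.zip n) ix nb false acc =
      (if (n.take (l.length - (l.dropWhile (· == ' ')).length)).all (· == ' ')
          && (n.drop (l.length - (l.dropWhile (· == ' ')).length)).all (fun c => c == '-' || c == '=')
       then some (String.ofList (acc ++ l.drop (l.length - (l.dropWhile (· == ' ')).length)))
       else none) := by
  induction l with
  | nil => intro _ _ _ _ _ _ hne; exact absurd rfl hne
  | cons pc rest ih =>
    intro n ix nb acc h1 h2 _
    cases n with
    | nil => simp at h2
    | cons c nrest =>
      simp only [List.length_cons] at h1 h2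
      have h2' : rest.length = nrest.length := by omega
      by_cases hpc : (pc == ' ') = true
      · -- still in the indent: header not reached
        have hpc' : pc = ' ' := by simpa using hpc
        subst hpc'
        have hdw : (List.dropWhile (· == ' ') (' ' :: rest)) = List.dropWhile (· == ' ') rest := by
          simp
        have hi : (' ' :: rest).length - (List.dropWhile (· == ' ') (' ' :: rest)).length
            = (rest.length - (List.dropWhile (· == ' ') rest).length) + 1 := by
          rw [hdw]; have := List.length_dropWhile_le (p := (· == ' ')) (l := rest)
          simp only [List.length_cons]; omega
        by_cases hc : (c == ' ') = true
        · have hc' : c = ' ' := by simpa using hc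
          subst hc'
          cases rest with
          | nil =>
            have hn : nrest = [] := by
              cases nrest with | nil => rfl | cons _ _ => simp at h2'
            subst hn
            have hix : (ix == nb - 1) = true := by
              simp only [beq_iff_eq]; simp only [List.length_nil] at h1; omega
            simp [pvALoop, hix]
          | cons q qs =>
            have hix : (ix == nb - 1) = false := by
              simp only [beq_eq_false_iff_ne, ne_eq]
              simp only [List.length_cons] at h1; omega
            have hrec := ih nrest (ix + 1) nb acc
              (by simp only [List.length_cons] at h1 ⊢; omega) h2' (by simp)
            rw [hi] at *
            simp only [List.zip_cons_cons, pvALoop]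
            simp only [List.take_succ_cons, List.drop_succ_cons] at *
            simp [hix, hrec, List.all_cons]
        · -- indent char over a non-space underline char: A fails, B's take-check fails
          simp only [List.zip_cons_cons, pvALoop]
          rw [hi]
          simp [hc, List.all_cons]
      · -- first non-space char of the line: header reached here
        have hpc' : ¬ pc = ' ' := by simpa using hpc
        have hdw : (List.dropWhile (· == ' ') (pc :: rest)) = pc :: rest := by
          simp [hpc]
        have hi : (pc :: rest).length - (List.dropWhile (· == ' ') (pc :: rest)).length = 0 := by
          rw [hdw]; omega
        rw [hi]
        simp only [List.take_zero, List.drop_zero, List.all_nil, Bool.true_and]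
        by_cases hc : (c == '-' || c == '=') = true
        · cases rest with
          | nil =>
            have hn : nrest = [] := by
              cases nrest with | nil => rfl | cons _ _ => simp at h2'
            subst hn
            have hix : (ix == nb - 1) = true := by
              simp only [beq_iff_eq]; simp only [List.length_nil] at h1; omega
            simp [pvALoop, hix, hpc', hc]
          | cons q qs =>
            have hix : (ix == nb - 1) = false := by
              simp only [beq_eq_false_iff_ne, ne_eq]
              simp only [List.length_cons] at h1; omega
            have hrec := pvALoop_header (q :: qs) nrest (ix + 1) nb (acc ++ [pc])
              (by simp only [List.length_cons] at h1 ⊢; omega) h2'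
            have hb : (pc != ' ') = true := by simpa using hpc
            simp [pvALoop, hb, hix, hc, hrec, List.all_cons, List.append_assoc]
        · simp [pvALoop, hpc', hc, List.all_cons]

-- ===== VERDICT (by name: the statement is the Claim_ definition above) =====
theorem find_from_lines_py_spec : Claim_equal_find_from_lines_py := by
  intro line next_line _
  unfold Spec_find_from_lines_py find_from_lines_py find_from_lines_py_alt
  cases next_line with
  | none => rfl
  | some nls =>
    simp only
    by_cases hg : (PySem.Chars.strip line.toList).isEmpty || (PySem.Chars.strip nls.toList).isEmpty
    · simp [hg]
    · simp only [hg, if_false]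
      cases hget : PySem.List.pyGet? (PySem.Chars.strip (PySem.Chars.rstrip line.toList)) 0 with
      | none => rfl
      | some c0 =>
        by_cases hu : (!(PySem.Chars.isupper c0)) = true
        · simp [hu]
        · simp only [Bool.not_eq_true] at hu
          simp only [hu, Bool.false_eq_true, if_false]
          by_cases hlen : (PySem.Chars.rstrip line.toList).length = (PySem.Chars.rstrip nls.toList).length
          · rw [if_neg (by simpa using hlen), if_neg (by simpa using hlen)]
            rw [pv_rstrip_idem, pv_rstrip_idem]
            have hne : PySem.Chars.rstrip line.toList ≠ [] := by
              apply pv_rstrip_ne_nil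
              simp only [Bool.or_eq_true, List.isEmpty_iff] at hg
              intro h; exact hg (Or.inl h)
            rw [pvALoop_pre _ _ 0 _ [] (by simp) hlen hne]
            simp
          · rw [if_pos (by simpa using hlen), if_pos (by simpa using hlen)]
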